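-- pv_equiv track=rewrite | github.com/lypnol/adventofcode-2019 | day-15/part-2/thore.py | pprint_world
-- ===== SOURCE A (Python) =====
-- from enum import IntEnum
--
-- class Tile(IntEnum):
--     WALL = 0
--     EMPTY = 1
--     OXYGEN = 2
--     VISITED = 10
--
-- def pprint_world(world, pos):
--     chars = {
--         Tile.EMPTY: "\u00b7",
--         Tile.WALL: "\u2588",
--         Tile.OXYGEN: "O",
--         Tile.VISITED: "x",
--     }
--     xmin, xmax = min([p[0] for p in world]), max([p[0] for p in world])
--     ymin, ymax = min([p[1] for p in world]), max([p[1] for p in world])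
--
--     return "\n".join(
--         [
--             "".join(
--                 [
--                     "#"
--                     if (x, y) == pos
--                     else (chars[world[(x, y)]] if (x, y) in world else " ")
--                     for x in range(xmin, xmax + 1)
--                 ]
--             )
--             for y in range(ymax, ymin - 1, -1)
--         ]
--     )
-- ===== SOURCE B (Python) =====
-- def pprint_world(world, pos):
--     chars = {
--         1: "\u00b7",
--         0: "\u2588",
--         2: "O",
--         10: "x",
--     }
--     xmin = min(p[0] for p in world)
--     xmax = max(p[0] for p in world)
--     ymin = min(p[1] for p in world)
--     ymax = max(p[1] for p in world)
--     width = xmax - xmin + 1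
--     grid = [[" "] * width for _ in range(ymax - ymin + 1)]
--     for (x, y), v in world.items():
--         if (x, y) != pos:
--             grid[ymax - y][x - xmin] = chars[v]
--     px, py = pos
--     if xmin <= px <= xmax and ymin <= py <= ymax:
--         grid[ymax - py][px - xmin] = "#"
--     return "\n".join("".join(row) for row in grid)
-- ===== Notes on version B (the rewrite author's own statement) =====
-- stated objective: alternative
-- what changed: B computes the bounding box, allocates a blank grid, scatters each world cell into its slot in one pass over the dict items and overlays '#', instead of A's per-coordinate membership test and lookup for every cell of the box.
import Mathlib
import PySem

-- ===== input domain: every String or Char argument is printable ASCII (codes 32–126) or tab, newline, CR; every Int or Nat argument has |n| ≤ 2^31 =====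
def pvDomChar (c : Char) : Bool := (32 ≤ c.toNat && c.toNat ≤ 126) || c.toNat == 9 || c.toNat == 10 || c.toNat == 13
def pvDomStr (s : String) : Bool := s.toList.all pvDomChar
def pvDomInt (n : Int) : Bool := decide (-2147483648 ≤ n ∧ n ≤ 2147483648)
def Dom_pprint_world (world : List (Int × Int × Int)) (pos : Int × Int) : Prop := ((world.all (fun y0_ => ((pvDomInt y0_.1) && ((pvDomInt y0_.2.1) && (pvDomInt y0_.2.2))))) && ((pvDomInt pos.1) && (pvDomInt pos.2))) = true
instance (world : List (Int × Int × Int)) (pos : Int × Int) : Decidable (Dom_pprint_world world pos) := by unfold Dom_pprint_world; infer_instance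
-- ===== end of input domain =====

-- B renders by allocating a blank bounding-box grid and scattering each world cell into it
-- in one pass over the dict items (then overlaying '#'), instead of A's per-cell
-- membership test + lookup for every coordinate of the box (objective: alternative).

-- the `chars` dict literal both Pythons define (EMPTY, WALL, OXYGEN, VISITED)
def pvChars : PySem.Dict Int String := PySem.Dict.ofList [(1, "·"), (0, "█"), (2, "O"), (10, "x")]

-- ===== PORT A =====
-- `(x, y) in world` / `world[(x, y)]` on the dict = first (= unique, keys are distinct) match
-- in the association list; `chars[...]` via getD — the KeyError case is excluded by Pre_.
def pprint_world (world : List (Int × Int × Int)) (pos : Int × Int) : String :=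
  let xmin := (PySem.List.min? (world.map (fun p => p.1)) (fun v => v)).getD 0
  let xmax := (PySem.List.max? (world.map (fun p => p.1)) (fun v => v)).getD 0
  let ymin := (PySem.List.min? (world.map (fun p => p.2.1)) (fun v => v)).getD 0
  let ymax := (PySem.List.max? (world.map (fun p => p.2.1)) (fun v => v)).getD 0
  String.intercalate "\n"
    ((PySem.List.pyRange ymax (ymin - 1) (-1)).map (fun y =>
      String.join ((PySem.List.pyRange xmin (xmax + 1) 1).map (fun x =>
        if (x, y) = pos then "#"
        else
          match world.find? (fun p => p.1 == x && p.2.1 == y) with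
          | some p => pvChars.getD p.2.2 "?"
          | none => " "))))

-- ===== PORT B =====
-- grid[r][c] mutation = List.modify / List.set (all indices are provably in range here,
-- so this is exact); the KeyError case (chars.getD) is excluded by Pre_.
def pprint_world_alt (world : List (Int × Int × Int)) (pos : Int × Int) : String :=
  let xmin := (PySem.List.min? (world.map (fun p => p.1)) (fun v => v)).getD 0
  let xmax := (PySem.List.max? (world.map (fun p => p.1)) (fun v => v)).getD 0
  let ymin := (PySem.List.min? (world.map (fun p => p.2.1)) (fun v => v)).getD 0
  let ymax := (PySem.List.max? (world.map (fun p => p.2.1)) (fun v => v)).getD 0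
  let width := (xmax - xmin + 1).toNat
  let blank : List (List String) := List.replicate (ymax - ymin + 1).toNat (List.replicate width " ")
  let grid := world.foldl (fun g p =>
      if (p.1, p.2.1) = pos then g
      else g.modify (ymax - p.2.1).toNat (fun row => row.set (p.1 - xmin).toNat (pvChars.getD p.2.2 "?"))) blank
  let grid2 := if xmin ≤ pos.1 ∧ pos.1 ≤ xmax ∧ ymin ≤ pos.2 ∧ pos.2 ≤ ymax
      then grid.modify (ymax - pos.2).toNat (fun row => row.set (pos.1 - xmin).toNat "#")
      else grid
  String.intercalate "\n" (grid2.map String.join)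

-- ===== PRECONDITION & SPEC =====
-- Pre_ excludes: the empty world (A's min() raises ValueError); a tile value outside chars
-- at a cell other than pos (A raises KeyError); and lists with duplicate (x,y) keys, which
-- do not encode a Python dict (world is a dict, its keys are distinct).
def Pre_pprint_world (world : List (Int × Int × Int)) (pos : Int × Int) : Prop :=
  world ≠ [] ∧ (world.map (fun p => (p.1, p.2.1))).Nodup ∧
  ∀ p ∈ world, (p.1, p.2.1) = pos ∨ p.2.2 = 0 ∨ p.2.2 = 1 ∨ p.2.2 = 2 ∨ p.2.2 = 10
instance (world : List (Int × Int × Int)) (pos : Int × Int) : Decidable (Pre_pprint_world world pos) := by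
  unfold Pre_pprint_world; infer_instance

def pvWitness_pprint_world : (List (Int × Int × Int)) × (Int × Int) := ([(0, 0, 1), (1, 0, 0)], (0, 0))

def Spec_pprint_world (world : List (Int × Int × Int)) (pos : Int × Int) (out : String) : Prop := out = pprint_world_alt world pos
instance (world : List (Int × Int × Int)) (pos : Int × Int) (out : String) : Decidable (Spec_pprint_world world pos out) := by unfold Spec_pprint_world; infer_instance

-- ===== CLAIM (what is proved, stated in full; the proofs are below) =====
def Claim_equal_pprint_world : Prop := ∀ (world : List (Int × Int × Int)) (pos : Int × Int), Dom_pprint_world world pos → Pre_pprint_world world pos → Spec_pprint_world world pos (pprint_world world pos)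

-- ===== LEMMAS AND PROOFS =====

def pvKey (p : Int × Int × Int) : Int × Int := (p.1, p.2.1)

def pvCell (world : List (Int × Int × Int)) (pos : Int × Int) (x y : Int) : String :=
  if (x, y) = pos then "#"
  else
    match world.find? (fun p => p.1 == x && p.2.1 == y) with
    | some p => pvChars.getD p.2.2 "?"
    | none => " "

def pvStep (pos : Int × Int) (xmin ymax : Int) (g : List (List String)) (p : Int × Int × Int) :
    List (List String) :=
  if (p.1, p.2.1) = pos then g
  else g.modify (ymax - p.2.1).toNat (fun row => row.set (p.1 - xmin).toNat (pvChars.getD p.2.2 "?"))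

def pvCellAt (g : List (List String)) (r c : Nat) : String := (g.getD r []).getD c " "

def pvShaped (H W : Nat) (g : List (List String)) : Prop :=
  g.length = H ∧ ∀ row ∈ g, row.length = W

lemma pvShaped_blank (H W : Nat) : pvShaped H W (List.replicate H (List.replicate W " ")) := by
  refine ⟨by simp, ?_⟩
  intro row hrow
  simp [List.eq_of_mem_replicate hrow]

lemma pvShaped_modify (H W : Nat) (g : List (List String)) (h : pvShaped H W g)
    (r0 c0 : Nat) (s : String) :
    pvShaped H W (g.modify r0 (fun row => row.set c0 s)) := by
  obtain ⟨h1, h2⟩ := h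
  refine ⟨by simpa using h1, ?_⟩
  intro row hrow
  rw [List.mem_iff_getElem] at hrow
  obtain ⟨i, hi, hrow⟩ := hrow
  rw [List.getElem_modify] at hrow
  split at hrow
  · rw [← hrow]
    simpa using h2 _ (List.getElem_mem _)
  · rw [← hrow]
    exact h2 _ (List.getElem_mem _)

lemma pvShaped_step (pos : Int × Int) (xmin ymax : Int) (H W : Nat)
    (g : List (List String)) (h : pvShaped H W g) (p : Int × Int × Int) :
    pvShaped H W (pvStep pos xmin ymax g p) := by
  unfold pvStep
  split
  · exact h
  · exact pvShaped_modify H W g h _ _ _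

lemma pvCellAt_eq (g : List (List String)) (r c : Nat) :
    pvCellAt g r c = (g[r]?.getD [])[c]?.getD " " := by
  simp [pvCellAt, List.getD_eq_getElem?_getD]

lemma pvCellAt_blank (H W : Nat) (r c : Nat) :
    pvCellAt (List.replicate H (List.replicate W " ")) r c = " " := by
  rw [pvCellAt_eq, List.getElem?_replicate]
  split
  · simp [List.getElem?_replicate]
    split <;> simp
  · simp

lemma pvCellAt_of_getElem (g : List (List String)) (r c : Nat)
    (hr : r < g.length) (hc : c < g[r].length) : pvCellAt g r c = g[r][c] := by
  rw [pvCellAt_eq, List.getElem?_eq_getElem hr]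
  simp [List.getElem?_eq_getElem hc]

lemma pvCellAt_modify (H W : Nat) (g : List (List String)) (h : pvShaped H W g)
    (r0 c0 : Nat) (hr0 : r0 < H) (hc0 : c0 < W) (s : String) (r c : Nat) :
    pvCellAt (g.modify r0 (fun row => row.set c0 s)) r c =
      if r0 = r ∧ c0 = c then s else pvCellAt g r c := by
  obtain ⟨h1, h2⟩ := h
  rw [pvCellAt_eq, pvCellAt_eq, List.getElem?_modify]
  by_cases hrr : r0 = r
  · subst hrr
    have hr0' : r0 < g.length := by omega
    have hlen : (g[r0]'hr0').length = W := h2 _ (List.getElem_mem _)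
    rw [List.getElem?_eq_getElem hr0']
    by_cases hcc : c0 = c
    · subst hcc
      simp [hlen, hc0]
    · simp [hcc]
  · rcases g[r]? with _ | row <;> simp [hrr]

lemma pvFill (pos : Int × Int) (xmin xmax ymin ymax : Int) (H W : Nat)
    (hH : (H : Int) = ymax - ymin + 1) (hW : (W : Int) = xmax - xmin + 1) :
    ∀ (l : List (Int × Int × Int)) (g : List (List String)),
      pvShaped H W g →
      (∀ p ∈ l, xmin ≤ p.1 ∧ p.1 ≤ xmax ∧ ymin ≤ p.2.1 ∧ p.2.1 ≤ ymax) →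
      (l.map pvKey).Nodup →
      pvShaped H W (l.foldl (pvStep pos xmin ymax) g) ∧
      ∀ r c : Nat, r < H → c < W →
      pvCellAt (l.foldl (pvStep pos xmin ymax) g) r c =
        match l.find? (fun p => p.1 == xmin + (c : Int) && p.2.1 == ymax - (r : Int)) with
        | some p => if pvKey p = pos then pvCellAt g r c else pvChars.getD p.2.2 "?"
        | none => pvCellAt g r c := by
  intro l
  induction l with
  | nil => intro g hg _ _; exact ⟨hg, fun r c _ _ => by simp⟩
  | cons p l ih =>
    intro g hg hbound hnd
    have hb := hbound p (by simp)
    have hg' := pvShaped_step pos xmin ymax H W g hg p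
    rw [List.map_cons, List.nodup_cons] at hnd
    have hnd' : (l.map pvKey).Nodup := hnd.2
    have hpnot : pvKey p ∉ l.map pvKey := hnd.1
    obtain ⟨hsh, hcell⟩ := ih (pvStep pos xmin ymax g p) hg'
      (fun q hq => hbound q (by simp [hq])) hnd'
    refine ⟨by simpa using hsh, ?_⟩
    intro r c hr hc
    rw [List.foldl_cons, hcell r c hr hc, List.find?_cons]
    by_cases hpk : (p.1 == xmin + (c : Int) && p.2.1 == ymax - (r : Int)) = true
    · have hx : p.1 = xmin + (c : Int) ∧ p.2.1 = ymax - (r : Int) := by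
        simpa [Bool.and_eq_true, beq_iff_eq] using hpk
      have hfind : l.find? (fun q => q.1 == xmin + (c : Int) && q.2.1 == ymax - (r : Int)) = none := by
        rw [List.find?_eq_none]
        intro q hq hqk
        have hq' : q.1 = xmin + (c : Int) ∧ q.2.1 = ymax - (r : Int) := by
          simpa [Bool.and_eq_true, beq_iff_eq] using hqk
        exact hpnot (by
          have : pvKey q = pvKey p := by simp [pvKey, hx.1, hx.2, hq'.1, hq'.2]
          exact this ▸ List.mem_map_of_mem hq)
      rw [hfind]
      simp only [hpk]
      unfold pvStep
      by_cases hppos : (p.1, p.2.1) = pos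
      · simp [hppos, pvKey]
      · have hkeq : pvKey p = pos ↔ False := by simp [pvKey, hppos]
        rw [if_neg hppos,
          pvCellAt_modify H W g hg _ _ (by omega) (by omega) _ r c,
          if_pos (by constructor <;> omega)]
        simp [pvKey, hppos]
    · simp only [hpk]
      have hsame : pvCellAt (pvStep pos xmin ymax g p) r c = pvCellAt g r c := by
        unfold pvStep
        by_cases hppos : (p.1, p.2.1) = pos
        · rw [if_pos hppos]
        · rw [if_neg hppos,
            pvCellAt_modify H W g hg _ _ (by omega) (by omega) _ r c, if_neg]
          intro ⟨h1', h2'⟩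
          apply hpk
          have : p.2.1 = ymax - (r : Int) := by omega
          have : p.1 = xmin + (c : Int) := by omega
          simp [Bool.and_eq_true, beq_iff_eq]
          omega
      rw [hsame]

lemma pvMatchNoPos (world : List (Int × Int × Int)) (pos : Int × Int) (x y : Int)
    (hxy : (x, y) ≠ pos) :
    (match world.find? (fun p => p.1 == x && p.2.1 == y) with
     | some p => if pvKey p = pos then " " else pvChars.getD p.2.2 "?"
     | none => " ") =
    (match world.find? (fun p => p.1 == x && p.2.1 == y) with
     | some p => pvChars.getD p.2.2 "?"
     | none => " ") := by
  rcases hf : world.find? (fun p => p.1 == x && p.2.1 == y) with _ | p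
  · simp only [hf]
  · simp only [hf]
    have hp : p.1 = x ∧ p.2.1 = y := by
      simpa [Bool.and_eq_true, beq_iff_eq] using List.find?_some hf
    have : pvKey p ≠ pos := by
      unfold pvKey
      rw [hp.1, hp.2]
      exact hxy
    simp [this]

lemma pvCell_final (world : List (Int × Int × Int)) (pos : Int × Int)
    (xm xM ym yM : Int) (H W : Nat)
    (hH : (H : Int) = yM - ym + 1) (hW : (W : Int) = xM - xm + 1)
    (hb : ∀ p ∈ world, xm ≤ p.1 ∧ p.1 ≤ xM ∧ ym ≤ p.2.1 ∧ p.2.1 ≤ yM)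
    (hnd : (world.map pvKey).Nodup)
    (g2 : List (List String))
    (hg2 : g2 = if xm ≤ pos.1 ∧ pos.1 ≤ xM ∧ ym ≤ pos.2 ∧ pos.2 ≤ yM
      then (world.foldl (pvStep pos xm yM) (List.replicate H (List.replicate W " "))).modify
        (yM - pos.2).toNat (fun row => row.set (pos.1 - xm).toNat "#")
      else world.foldl (pvStep pos xm yM) (List.replicate H (List.replicate W " "))) :
    pvShaped H W g2 ∧
    ∀ r c : Nat, r < H → c < W →
    pvCellAt g2 r c = pvCell world pos (xm + (c : Int)) (yM - (r : Int)) := by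
  obtain ⟨hs1, hcell⟩ := pvFill pos xm xM ym yM H W hH hW world
    (List.replicate H (List.replicate W " ")) (pvShaped_blank H W) hb hnd
  constructor
  · rw [hg2]
    split
    · exact pvShaped_modify H W _ hs1 _ _ _
    · exact hs1
  intro r c hr hc
  have hcc := hcell r c hr hc
  simp only [pvCellAt_blank] at hcc
  by_cases hbox : xm ≤ pos.1 ∧ pos.1 ≤ xM ∧ ym ≤ pos.2 ∧ pos.2 ≤ yM
  · rw [hg2, if_pos hbox,
      pvCellAt_modify H W _ hs1 _ _ (by omega) (by omega) _ r c]
    by_cases hrc : (yM - pos.2).toNat = r ∧ (pos.1 - xm).toNat = c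
    · rw [if_pos hrc]
      have hpos : (xm + (c : Int), yM - (r : Int)) = pos := by
        obtain ⟨hp1, hp2⟩ := Prod.mk.injEq pos.1 pos.2 pos.1 pos.2 ▸ rfl
        have : pos = (pos.1, pos.2) := rfl
        rw [this]
        obtain ⟨h1, h2⟩ := hrc
        refine Prod.ext ?_ ?_ <;> simp <;> omega
      simp [pvCell, hpos]
    · rw [if_neg hrc, hcc]
      have hpos : (xm + (c : Int), yM - (r : Int)) ≠ pos := by
        intro h
        apply hrc
        have h1 : pos.1 = xm + (c : Int) := by rw [← h]
        have h2 : pos.2 = yM - (r : Int) := by rw [← h]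
        constructor <;> omega
      rw [pvMatchNoPos world pos _ _ hpos]
      simp [pvCell, hpos]
  · rw [hg2, if_neg hbox, hcc]
    have hpos : (xm + (c : Int), yM - (r : Int)) ≠ pos := by
      intro h
      apply hbox
      have h1 : pos.1 = xm + (c : Int) := by rw [← h]
      have h2 : pos.2 = yM - (r : Int) := by rw [← h]
      constructor
      · omega
      constructor
      · omega
      constructor <;> omega
    rw [pvMatchNoPos world pos _ _ hpos]
    simp [pvCell, hpos]

-- ===== VERDICT (by name: the statement is the Claim_ definition above) =====
theorem pprint_world_spec : Claim_equal_pprint_world := by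
  intro world pos _ hpre
  obtain ⟨hne, hnd, _⟩ := hpre
  unfold Spec_pprint_world
  rcases hx1 : PySem.List.min? (world.map (fun p => p.1)) (fun v => v) with _ | xm
  · exact absurd (List.map_eq_nil_iff.mp ((PySem.List.min?_eq_none_iff _ _).mp hx1)) hne
  rcases hx2 : PySem.List.max? (world.map (fun p => p.1)) (fun v => v) with _ | xM
  · exact absurd (List.map_eq_nil_iff.mp ((PySem.List.max?_eq_none_iff _ _).mp hx2)) hne
  rcases hy1 : PySem.List.min? (world.map (fun p => p.2.1)) (fun v => v) with _ | ym
  · exact absurd (List.map_eq_nil_iff.mp ((PySem.List.min?_eq_none_iff _ _).mp hy1)) hne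
  rcases hy2 : PySem.List.max? (world.map (fun p => p.2.1)) (fun v => v) with _ | yM
  · exact absurd (List.map_eq_nil_iff.mp ((PySem.List.max?_eq_none_iff _ _).mp hy2)) hne
  have hb : ∀ p ∈ world, xm ≤ p.1 ∧ p.1 ≤ xM ∧ ym ≤ p.2.1 ∧ p.2.1 ≤ yM := by
    intro p hp
    exact ⟨PySem.List.min?_isMin hx1 _ (List.mem_map_of_mem hp),
      PySem.List.max?_isMax hx2 _ (List.mem_map_of_mem hp),
      PySem.List.min?_isMin hy1 _ (List.mem_map_of_mem hp),
      PySem.List.max?_isMax hy2 _ (List.mem_map_of_mem hp)⟩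
  obtain ⟨w0, hw0⟩ := List.exists_mem_of_ne_nil world hne
  have hxmM : xm ≤ xM := le_trans (hb w0 hw0).1 (hb w0 hw0).2.1
  have hymM : ym ≤ yM := le_trans (hb w0 hw0).2.2.1 (hb w0 hw0).2.2.2
  simp only [pprint_world, pprint_world_alt, hx1, hx2, hy1, hy2, Option.getD_some]
  have hstep : (fun (g : List (List String)) (p : Int × Int × Int) =>
      if (p.1, p.2.1) = pos then g
      else g.modify (yM - p.2.1).toNat
        (fun row => row.set (p.1 - xm).toNat (pvChars.getD p.2.2 "?"))) = pvStep pos xm yM := rfl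
  rw [hstep]
  obtain ⟨hs2, hcellf⟩ := pvCell_final world pos xm xM ym yM
    (yM - ym + 1).toNat (xM - xm + 1).toNat (by omega) (by omega) hb hnd _ rfl
  congr 1
  rw [PySem.List.pyRange_neg_one, List.map_map]
  apply List.ext_getElem
  · simp [hs2.1]
    omega
  intro r h1 h2
  simp only [List.getElem_map, List.getElem_range, Function.comp]
  have hrH : r < (yM - ym + 1).toNat := by simp at h1; omega
  have hg2r : r < (if xm ≤ pos.1 ∧ pos.1 ≤ xM ∧ ym ≤ pos.2 ∧ pos.2 ≤ yM
      then (world.foldl (pvStep pos xm yM)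
        (List.replicate (yM - ym + 1).toNat (List.replicate (xM - xm + 1).toNat " "))).modify
        (yM - pos.2).toNat (fun row => row.set (pos.1 - xm).toNat "#")
      else world.foldl (pvStep pos xm yM)
        (List.replicate (yM - ym + 1).toNat (List.replicate (xM - xm + 1).toNat " "))).length := by
    rw [hs2.1]; exact hrH
  congr 1
  rw [PySem.List.pyRange_one, List.map_map]
  apply List.ext_getElem
  · simp
    rw [hs2.2 _ (List.getElem_mem hg2r)]
    omega
  intro c hc1 hc2
  simp only [List.getElem_map, List.getElem_range, Function.comp]
  have hcW : c < (xM - xm + 1).toNat := by simp at hc1; omega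
  have hrow : _ = (xM - xm + 1).toNat := hs2.2 _ (List.getElem_mem hg2r)
  rw [← pvCellAt_of_getElem _ r c hg2r (by rw [hrow]; exact hcW),
    hcellf r c hrH hcW]
  simp [pvCell]
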